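-- pv_equiv track=rewrite | github.com/AliAbbas10/test | scripts/detection/wire_label_matcher.py | find_label_matches
-- ===== SOURCE A (Python) =====
-- from collections import defaultdict
--
-- def find_label_matches(detections: list, min_occurrences: int = 2) -> dict:
--     """
--     Group detections by normalized label and find matches.
--     Returns dictionary of labels with their occurrences.
--     """
--     label_groups = defaultdict(list)
--
--     for detection in detections:
--         label = detection['normalized_label']
--         label_groups[label].append(detection)
--
--     # Keep only labels that appear multiple times
--     matches = {
--         label: occurrences
--         for label, occurrences in label_groups.items()
--         if len(occurrences) >= min_occurrences
--     }
--
--     return matches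
-- ===== SOURCE B (Python) =====
-- from collections import Counter
--
-- def find_label_matches(detections: list, min_occurrences: int = 2) -> dict:
--     # Count labels first, then build only the frequent groups in one filtered pass.
--     counts = Counter(d['normalized_label'] for d in detections)
--     matches = {}
--     for detection in detections:
--         label = detection['normalized_label']
--         if counts[label] >= min_occurrences:
--             matches.setdefault(label, []).append(detection)
--     return matches
-- ===== Notes on version B (the rewrite author's own statement) =====
-- stated objective: alternative
-- what changed: Instead of materializing every label's group and filtering the grouped dict afterwards, B counts labels with a Counter first and then builds only the frequent groups in a single filtered pass, never allocating lists for infrequent labels.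
import Mathlib
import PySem

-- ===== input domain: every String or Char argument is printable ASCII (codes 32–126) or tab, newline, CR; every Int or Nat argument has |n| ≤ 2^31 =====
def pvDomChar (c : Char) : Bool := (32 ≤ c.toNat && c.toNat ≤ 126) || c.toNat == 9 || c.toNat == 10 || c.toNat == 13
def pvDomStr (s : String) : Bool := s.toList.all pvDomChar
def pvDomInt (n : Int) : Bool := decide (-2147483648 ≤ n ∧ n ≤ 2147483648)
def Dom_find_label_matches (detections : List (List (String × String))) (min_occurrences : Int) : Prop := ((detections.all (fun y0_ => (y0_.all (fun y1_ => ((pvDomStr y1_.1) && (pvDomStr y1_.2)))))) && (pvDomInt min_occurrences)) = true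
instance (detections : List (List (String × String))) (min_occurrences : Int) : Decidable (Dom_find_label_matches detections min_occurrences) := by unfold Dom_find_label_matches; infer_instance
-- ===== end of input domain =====

-- B counts labels with a Counter first and builds only the frequent groups in one
-- filtered pass, instead of materializing every group and filtering afterwards (objective: alternative).

-- ===== PORT A =====
-- detection['normalized_label']: dict lookup (first binding wins); none = KeyError
def pvLabel (det : List (String × String)) : Option String :=
  (PySem.Dict.mk det).get? "normalized_label"

def find_label_matches (detections : List (List (String × String))) (min_occurrences : Int) :
    List (String × List (List (String × String))) :=
  -- label_groups = defaultdict(list); for detection: label_groups[label].append(detection)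
  let groups : Option (PySem.Dict String (List (List (String × String)))) :=
    detections.foldl
      (fun acc det => acc.bind fun g => (pvLabel det).map fun l => g.modify l [] (· ++ [det]))
      (some PySem.Dict.empty)
  match groups with
  | some g => g.items.filter (fun p => decide (min_occurrences ≤ (p.2.length : Int)))
  | none => []  -- unreachable under Pre_ (Python raises KeyError)

-- ===== PORT B =====
-- the generator (d['normalized_label'] for d in detections), consumed by Counter
def pvLabels : List (List (String × String)) → Option (List String)
  | [] => some []
  | det :: rest => (pvLabel det).bind fun l => (pvLabels rest).map fun ls => l :: ls

def find_label_matches_alt (detections : List (List (String × String))) (min_occurrences : Int) :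
    List (String × List (List (String × String))) :=
  match pvLabels detections with
  | none => []  -- unreachable under Pre_ (KeyError while Counter consumes the generator)
  | some ls =>
    let counts := PySem.Dict.counter ls
    -- for detection: if counts[label] >= min_occurrences: matches.setdefault(label, []).append(detection)
    let mtchs : Option (PySem.Dict String (List (List (String × String)))) :=
      detections.foldl
        (fun acc det => acc.bind fun m => (pvLabel det).map fun l =>
          if min_occurrences ≤ counts.getD l 0 then m.modify l [] (· ++ [det]) else m)
        (some PySem.Dict.empty)
    match mtchs with
    | some m => m.items
    | none => []  -- unreachable: pvLabels succeeded

-- ===== PRECONDITION & SPEC =====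
-- Pre_ excludes exactly the detections missing the 'normalized_label' key, on which A raises KeyError.
def Pre_find_label_matches (detections : List (List (String × String))) (min_occurrences : Int) : Prop :=
  ∀ det ∈ detections, "normalized_label" ∈ det.map Prod.fst
instance (detections : List (List (String × String))) (min_occurrences : Int) : Decidable (Pre_find_label_matches detections min_occurrences) := by unfold Pre_find_label_matches; infer_instance

def pvWitness_find_label_matches : (List (List (String × String))) × Int :=
  ([[("normalized_label", "cat")], [("normalized_label", "cat"), ("x", "1")], [("normalized_label", "dog")]], 2)

def Spec_find_label_matches (detections : List (List (String × String))) (min_occurrences : Int) (out : List (String × List (List (String × String)))) : Prop := out = find_label_matches_alt detections min_occurrences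
instance (detections : List (List (String × String))) (min_occurrences : Int) (out : List (String × List (List (String × String)))) : Decidable (Spec_find_label_matches detections min_occurrences out) := by unfold Spec_find_label_matches; infer_instance

-- ===== CLAIM (what is proved, stated in full; the proofs are below) =====
def Claim_equal_find_label_matches : Prop := ∀ (detections : List (List (String × String))) (min_occurrences : Int), Dom_find_label_matches detections min_occurrences → Pre_find_label_matches detections min_occurrences → Spec_find_label_matches detections min_occurrences (find_label_matches detections min_occurrences)

-- ===== LEMMAS AND PROOFS =====

-- total label function, valid where pvLabel is some (proof-side helper)
def labF (det : List (String × String)) : String := (pvLabel det).getD ""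

lemma labF_eq {det : List (String × String)} {l : String} (h : pvLabel det = some l) :
    labF det = l := by simp [labF, h]

-- an Option-threaded fold whose labels all resolve is the total fold
lemma pvFoldBind {σ : Type} (step : σ → String → List (String × String) → σ) :
    ∀ (dets : List (List (String × String))),
      (∀ det ∈ dets, (pvLabel det).isSome) → ∀ (s0 : σ),
      dets.foldl (fun acc det => acc.bind fun s => (pvLabel det).map fun l => step s l det)
          (some s0)
        = some (dets.foldl (fun s det => step s (labF det) det) s0)
  | [], _, s0 => rfl
  | det :: rest, h, s0 => by
      obtain ⟨l, hl⟩ := Option.isSome_iff_exists.mp (h det (by simp))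
      simp only [List.foldl_cons, hl, Option.bind_some, Option.map_some,
        labF_eq hl]
      exact pvFoldBind step rest (fun d hd => h d (List.mem_cons_of_mem _ hd)) _

lemma pvLabels_eq : ∀ (dets : List (List (String × String))),
    (∀ det ∈ dets, (pvLabel det).isSome) → pvLabels dets = some (dets.map labF)
  | [], _ => rfl
  | det :: rest, h => by
      obtain ⟨l, hl⟩ := Option.isSome_iff_exists.mp (h det (by simp))
      simp only [pvLabels, hl, pvLabels_eq rest (fun d hd => h d (by simp [hd])),
        Option.bind_some, Option.map_some, List.map_cons, labF_eq hl]

-- a conditional fold is the fold of the filtered list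
lemma foldl_ite_filter {σ α : Type} (p : α → Prop) [DecidablePred p] (f : σ → α → σ) :
    ∀ (l : List α) (s0 : σ),
      l.foldl (fun s x => if p x then f s x else s) s0
        = (l.filter (fun x => decide (p x))).foldl f s0
  | [], _ => rfl
  | x :: l, s0 => by
      by_cases hx : p x <;>
        simp [List.foldl_cons, hx, foldl_ite_filter p f l]

-- set(…) commutes with filter
lemma ofList_filter {α : Type} [BEq α] [LawfulBEq α] (p : α → Bool) (xs : List α) :
    PySem.Set.ofList (xs.filter p) = (PySem.Set.ofList xs).filter p := by
  induction xs using List.reverseRecOn with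
  | nil => rfl
  | append_singleton xs x ih =>
      rw [List.filter_append, PySem.Set.ofList_append_singleton]
      by_cases hp : p x = true
      · simp only [List.filter_cons, hp, if_pos, List.filter_nil,
          PySem.Set.ofList_append_singleton, ih]
        by_cases hx : x ∈ PySem.Set.ofList xs
        · rw [PySem.Set.add_of_mem hx,
            PySem.Set.add_of_mem (List.mem_filter.mpr ⟨hx, hp⟩)]
        · rw [PySem.Set.add_of_not_mem hx, List.filter_append,
            PySem.Set.add_of_not_mem (fun hmem => hx (List.mem_filter.mp hmem).1)]
          simp [hp]
      · simp only [List.filter_cons, hp, if_neg, Bool.false_eq_true, not_false_iff,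
          List.filter_nil, List.append_nil, ih]
        by_cases hx : x ∈ PySem.Set.ofList xs
        · rw [PySem.Set.add_of_mem hx]
        · rw [PySem.Set.add_of_not_mem hx, List.filter_append]
          simp [hp]

-- the grouping fold (both ports reduce to it)
def gFold (dets : List (List (String × String))) :
    PySem.Dict String (List (List (String × String))) :=
  dets.foldl (fun g det => g.modify (labF det) [] (· ++ [det])) PySem.Dict.empty

lemma gFold_keys (dets : List (List (String × String))) :
    (gFold dets).keys = PySem.Set.ofList (dets.map labF) := by
  unfold gFold
  rw [PySem.Dict.keys_foldl_modify_key]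
  simp [PySem.Set.update_nil_left]

lemma gFold_nodup (dets : List (List (String × String))) : (gFold dets).keys.Nodup := by
  unfold gFold
  exact PySem.Dict.nodup_keys_foldl_modify_key _ _ _ _ _ (by simp)

lemma gFold_getD (dets : List (List (String × String))) (k : String) :
    (gFold dets).getD k [] = dets.filter (fun det => labF det == k) := by
  unfold gFold
  rw [← List.foldl_map (f := fun det => (labF det, det))
      (g := fun (d : PySem.Dict String (List (List (String × String)))) p =>
        d.modify p.1 [] (· ++ [p.2])),
    PySem.Dict.getD_foldl_modify_append, List.filter_map, List.map_map]
  simp only [Function.comp_def]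
  simp

lemma gFold_items (dets : List (List (String × String))) :
    (gFold dets).items
      = (PySem.Set.ofList (dets.map labF)).map
          (fun k => (k, dets.filter (fun det => labF det == k))) := by
  rw [PySem.Dict.items_eq_map_keys _ (gFold_nodup dets) []]
  simp only [gFold_keys, gFold_getD]

lemma foldA_eq (dets : List (List (String × String)))
    (h : ∀ det ∈ dets, (pvLabel det).isSome) :
    dets.foldl
        (fun (acc : Option (PySem.Dict String (List (List (String × String))))) det =>
          acc.bind fun g => (pvLabel det).map fun l => g.modify l [] (· ++ [det]))
        (some (PySem.Dict.empty : PySem.Dict String (List (List (String × String)))))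
      = some (gFold dets) :=
  pvFoldBind (σ := PySem.Dict String (List (List (String × String))))
    (fun g l det => g.modify l [] (· ++ [det])) dets h _

lemma foldB_eq (dets : List (List (String × String))) (minv : Int) (c : PySem.Dict String Int)
    (h : ∀ det ∈ dets, (pvLabel det).isSome) :
    dets.foldl
        (fun (acc : Option (PySem.Dict String (List (List (String × String))))) det =>
          acc.bind fun m => (pvLabel det).map fun l =>
          if minv ≤ c.getD l 0 then m.modify l [] (· ++ [det]) else m)
        (some (PySem.Dict.empty : PySem.Dict String (List (List (String × String)))))
      = some (dets.foldl (fun m det =>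
          if minv ≤ c.getD (labF det) 0 then m.modify (labF det) [] (· ++ [det]) else m)
          PySem.Dict.empty) :=
  pvFoldBind (σ := PySem.Dict String (List (List (String × String))))
    (fun m l det => if minv ≤ c.getD l 0 then m.modify l [] (· ++ [det]) else m) dets h _

lemma A_eq (dets : List (List (String × String))) (minv : Int)
    (h : ∀ det ∈ dets, (pvLabel det).isSome) :
    find_label_matches dets minv
      = ((PySem.Set.ofList (dets.map labF)).filter
            (fun k => decide (minv ≤ ((dets.filter (fun det => labF det == k)).length : Int)))).map
          (fun k => (k, dets.filter (fun det => labF det == k))) := by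
  unfold find_label_matches
  rw [foldA_eq dets h]
  show (gFold dets).items.filter (fun p => decide (minv ≤ ((p.2.length : Int)))) = _
  rw [gFold_items, List.filter_map]
  simp [Function.comp_def]

lemma B_eq (dets : List (List (String × String))) (minv : Int)
    (h : ∀ det ∈ dets, (pvLabel det).isSome) :
    find_label_matches_alt dets minv
      = (gFold (dets.filter
          (fun det => decide (minv ≤ (((dets.map labF).count (labF det) : Int)))))).items := by
  unfold find_label_matches_alt
  rw [pvLabels_eq dets h]
  show (match dets.foldl
      (fun acc det => acc.bind fun m => (pvLabel det).map fun l =>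
        if minv ≤ (PySem.Dict.counter (dets.map labF)).getD l 0 then m.modify l [] (· ++ [det]) else m)
      (some PySem.Dict.empty) with
    | some m => m.items
    | none => []) = _
  rw [foldB_eq dets minv (PySem.Dict.counter (dets.map labF)) h]
  show (dets.foldl (fun m det =>
      if minv ≤ (PySem.Dict.counter (dets.map labF)).getD (labF det) 0 then m.modify (labF det) [] (· ++ [det]) else m)
      PySem.Dict.empty).items = _
  simp only [PySem.Dict.getD_counter]
  exact congrArg PySem.Dict.items
    (foldl_ite_filter (fun det => minv ≤ (((dets.map labF).count (labF det) : Int)))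
      (fun m det => m.modify (labF det) [] (· ++ [det])) dets PySem.Dict.empty)

lemma count_eq_len_filter (dets : List (List (String × String))) (k : String) :
    (dets.map labF).count k = (dets.filter (fun det => labF det == k)).length := by
  rw [List.count_eq_countP, List.countP_map, List.countP_eq_length_filter]
  simp [Function.comp_def]

-- ===== VERDICT (by name: the statement is the Claim_ definition above) =====
theorem find_label_matches_spec : Claim_equal_find_label_matches := by
  intro dets minv _ hpre
  have h : ∀ det ∈ dets, (pvLabel det).isSome := by
    intro det hd
    have hk := hpre det hd
    rw [Option.isSome_iff_ne_none]
    intro hnone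
    unfold pvLabel at hnone
    rw [PySem.Dict.get?_eq_none_iff_not_mem_keys] at hnone
    exact hnone (by simpa [PySem.Dict.keys, PySem.Dict.items] using hk)
  unfold Spec_find_label_matches
  rw [A_eq dets minv h, B_eq dets minv h, gFold_items]
  have e1 : (dets.filter (fun det => decide (minv ≤ (((dets.map labF).count (labF det) : Int))))).map labF
      = (dets.map labF).filter (fun k => decide (minv ≤ (((dets.map labF).count k : Int)))) := by
    rw [List.filter_map]
    simp [Function.comp_def]
  rw [e1, ofList_filter]
  rw [List.filter_congr (l := PySem.Set.ofList (dets.map labF))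
    (q := fun k => decide (minv ≤ (((dets.map labF).count k : Int))))
    (by intro k _; simp [count_eq_len_filter dets k])]
  apply List.map_congr_left
  intro k hk
  have hq : decide (minv ≤ (((dets.map labF).count k : Int))) = true := (List.mem_filter.mp hk).2
  congr 1
  rw [List.filter_filter]
  apply List.filter_congr
  intro det _
  by_cases hbe : labF det == k
  · have : labF det = k := by simpa using hbe
    simp [this, hq]
  · simp [hbe]
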